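-- pv_equiv track=rewrite | github.com/2026-oil/myoil | neuralforecast/models/moderntcn.py | _infer_feature_length
-- ===== SOURCE A (Python) =====
-- def _ceil_div(numerator: int, denominator: int) -> int:
--     return -(-numerator // denominator)
--
-- def _infer_feature_length(
--     input_size: int,
--     patch_size: int,
--     patch_stride: int,
--     downsample_ratio: int,
--     num_stages: int,
-- ) -> int:
--     """Infer the last temporal length produced by the backbone."""
--     length = max(input_size, patch_size)
--     if patch_size != patch_stride:
--         length += patch_size - patch_stride
--     length = (length - patch_size) // patch_stride + 1
--     for _ in range(max(num_stages - 1, 0)):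
--         length = _ceil_div(length, downsample_ratio)
--     return length
-- ===== SOURCE B (Python) =====
-- def _infer_feature_length(
--     input_size: int,
--     patch_size: int,
--     patch_stride: int,
--     downsample_ratio: int,
--     num_stages: int,
-- ) -> int:
--     """Infer the last temporal length produced by the backbone, loop-free.
--
--     The patching head collapses algebraically: whether or not
--     patch_size == patch_stride, the padded sliding-window count equals
--     max(input_size, patch_size) // patch_stride.  The per-stage loop of
--     ceiling divisions collapses to a single ceiling division by
--     downsample_ratio ** max(num_stages - 1, 0).
--     """
--     length = max(input_size, patch_size) // patch_stride
--     return -(-length // downsample_ratio ** max(num_stages - 1, 0))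
-- ===== Notes on version B (the rewrite author's own statement) =====
-- stated objective: simpler
-- what changed: The patching-head branch and window arithmetic collapse to a single floor division max(input_size, patch_size) // patch_stride, and the per-stage loop of repeated ceiling divisions collapses to one ceiling division by downsample_ratio ** max(num_stages-1, 0), so B is two divisions with no branch and no loop.
-- outside the precondition, e.g. on _infer_feature_length(5, 1, 1, -2, 3): A returns 1, B returns 2
import Mathlib
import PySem

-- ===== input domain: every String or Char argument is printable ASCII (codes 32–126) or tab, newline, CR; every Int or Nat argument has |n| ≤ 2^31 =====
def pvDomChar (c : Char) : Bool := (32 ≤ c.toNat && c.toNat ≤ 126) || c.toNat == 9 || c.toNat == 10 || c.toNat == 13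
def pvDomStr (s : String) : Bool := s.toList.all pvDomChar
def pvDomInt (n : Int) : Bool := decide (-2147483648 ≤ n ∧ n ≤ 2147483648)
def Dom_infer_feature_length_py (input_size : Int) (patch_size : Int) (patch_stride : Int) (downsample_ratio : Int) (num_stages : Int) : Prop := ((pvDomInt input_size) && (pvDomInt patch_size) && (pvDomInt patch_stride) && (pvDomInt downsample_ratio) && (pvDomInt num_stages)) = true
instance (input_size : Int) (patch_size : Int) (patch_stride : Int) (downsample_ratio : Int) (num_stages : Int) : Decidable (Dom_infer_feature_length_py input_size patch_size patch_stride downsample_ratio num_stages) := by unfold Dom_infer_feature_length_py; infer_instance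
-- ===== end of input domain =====

-- ===== PORT A =====
-- B collapses A's head branch to one floor division and A's per-stage loop to one ceiling division (simpler, loop-free).
def ceil_div_py (numerator : Int) (denominator : Int) : Int :=
  -(PySem.Int.floordiv (-numerator) denominator)

def infer_feature_length_py (input_size : Int) (patch_size : Int) (patch_stride : Int) (downsample_ratio : Int) (num_stages : Int) : Int :=
  let length := max input_size patch_size
  let length := if patch_size != patch_stride then length + (patch_size - patch_stride) else length
  let length := PySem.Int.floordiv (length - patch_size) patch_stride + 1
  (List.range (max (num_stages - 1) 0).toNat).foldl
    (fun l _ => ceil_div_py l downsample_ratio) length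

-- ===== PORT B =====
def infer_feature_length_py_alt (input_size : Int) (patch_size : Int) (patch_stride : Int) (downsample_ratio : Int) (num_stages : Int) : Int :=
  let length := PySem.Int.floordiv (max input_size patch_size) patch_stride ;
  -(PySem.Int.floordiv (-length) (downsample_ratio ^ (max (num_stages - 1) 0).toNat))

-- ===== PRECONDITION & SPEC =====
-- Pre_ excludes patch_stride = 0 and (downsample_ratio = 0 with num_stages >= 2), on which both
-- programs raise ZeroDivisionError; it also excludes negative downsample_ratio with num_stages >= 3,
-- which is outside the natural domain of a downsampling config and where A's alternating-sign loop
-- values are an implementation accident that B does not reproduce.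
def Pre_infer_feature_length_py (input_size : Int) (patch_size : Int) (patch_stride : Int) (downsample_ratio : Int) (num_stages : Int) : Prop :=
  patch_stride ≠ 0 ∧ (num_stages ≤ 1 ∨ (num_stages = 2 ∧ downsample_ratio ≠ 0) ∨ 1 ≤ downsample_ratio)
instance (input_size : Int) (patch_size : Int) (patch_stride : Int) (downsample_ratio : Int) (num_stages : Int) : Decidable (Pre_infer_feature_length_py input_size patch_size patch_stride downsample_ratio num_stages) := by unfold Pre_infer_feature_length_py; infer_instance

def pvWitness_infer_feature_length_py : Int × Int × Int × Int × Int := (96, 8, 4, 2, 3)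

def Spec_infer_feature_length_py (input_size : Int) (patch_size : Int) (patch_stride : Int) (downsample_ratio : Int) (num_stages : Int) (out : Int) : Prop := out = infer_feature_length_py_alt input_size patch_size patch_stride downsample_ratio num_stages
instance (input_size : Int) (patch_size : Int) (patch_stride : Int) (downsample_ratio : Int) (num_stages : Int) (out : Int) : Decidable (Spec_infer_feature_length_py input_size patch_size patch_stride downsample_ratio num_stages out) := by unfold Spec_infer_feature_length_py; infer_instance

-- ===== CLAIM (what is proved, stated in full; the proofs are below) =====
def Claim_equal_infer_feature_length_py : Prop := ∀ (input_size : Int) (patch_size : Int) (patch_stride : Int) (downsample_ratio : Int) (num_stages : Int), Dom_infer_feature_length_py input_size patch_size patch_stride downsample_ratio num_stages → Pre_infer_feature_length_py input_size patch_size patch_stride downsample_ratio num_stages → Spec_infer_feature_length_py input_size patch_size patch_stride downsample_ratio num_stages (infer_feature_length_py input_size patch_size patch_stride downsample_ratio num_stages)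

-- ===== LEMMAS AND PROOFS =====

-- (a - s) // s + 1 = a // s for any s ≠ 0 (floor division)
theorem floordiv_sub_self_add_one (a s : Int) (hs : s ≠ 0) :
    PySem.Int.floordiv (a - s) s + 1 = PySem.Int.floordiv a s := by
  unfold PySem.Int.floordiv
  have h := Int.add_mul_fdiv_right a (-1) hs
  have : a + -1 * s = a - s := by ring
  rw [this] at h
  omega

-- A's head value equals B's head value, s ≠ 0
theorem head_eq (L p s : Int) (hs : s ≠ 0) :
    PySem.Int.floordiv ((if p != s then L + (p - s) else L) - p) s + 1 =
      PySem.Int.floordiv L s := by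
  by_cases h : p = s
  · subst h; simp [floordiv_sub_self_add_one L p hs]
  · have : (if p != s then L + (p - s) else L) - p = L - s := by
      simp [h]; ring
    rw [this, floordiv_sub_self_add_one L s hs]

-- ceil(x/1) = x
theorem ceil_div_one (x : Int) : ceil_div_py x 1 = x := by
  simp [ceil_div_py, PySem.Int.floordiv]

-- ceil(ceil(x/a)/b) = ceil(x/(a*b)) for positive a, b
theorem ceil_div_ceil_div (x a b : Int) (ha : 0 < a) (hb : 0 < b) :
    ceil_div_py (ceil_div_py x a) b = ceil_div_py x (a * b) := by
  unfold ceil_div_py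
  rw [neg_neg,
    PySem.Int.floordiv_eq_ediv_of_pos (a := -x) ha,
    PySem.Int.floordiv_eq_ediv_of_pos (b := b) hb,
    PySem.Int.floordiv_eq_ediv_of_pos (a := -x) (mul_pos ha hb),
    Int.ediv_ediv_of_nonneg (le_of_lt ha)]

-- the folded loop equals one ceiling division by r^m, for 1 ≤ r
theorem fold_ceil_eq (r : Int) (hr : 1 ≤ r) :
    ∀ (m : Nat) (L : Int),
      (List.range m).foldl (fun l _ => ceil_div_py l r) L = ceil_div_py L (r ^ m) := by
  intro m
  induction m with
  | zero => intro L; simpa using (ceil_div_one L).symm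
  | succ m ih =>
    intro L
    have hrm : (0:Int) < r ^ m := pow_pos (lt_of_lt_of_le one_pos hr) m
    rw [List.range_succ, List.foldl_append, ih L]
    simp only [List.foldl_cons, List.foldl_nil]
    rw [ceil_div_ceil_div L (r ^ m) r hrm (lt_of_lt_of_le one_pos hr), pow_succ]

-- ===== VERDICT (by name: the statement is the Claim_ definition above) =====
theorem infer_feature_length_py_spec : Claim_equal_infer_feature_length_py := by
  intro input_size patch_size patch_stride downsample_ratio num_stages _ hpre
  unfold Spec_infer_feature_length_py infer_feature_length_py infer_feature_length_py_alt
  rcases hpre with ⟨hs, hns | ⟨hn2, hr0⟩ | hr⟩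
  · have hm : (max (num_stages - 1) 0).toNat = 0 := by omega
    simp only [hm, List.range_zero, List.foldl_nil, pow_zero]
    rw [head_eq _ _ _ hs]
    exact (ceil_div_one _).symm
  · have hm : (max (num_stages - 1) 0).toNat = 1 := by omega
    simp only [hm, List.range_one, List.foldl_cons, List.foldl_nil, pow_one]
    rw [head_eq _ _ _ hs]
    rfl
  · rw [fold_ceil_eq downsample_ratio hr _ _]
    show ceil_div_py _ _ = _
    rw [head_eq _ _ _ hs]
    rfl
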